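-- pv_equiv track=rewrite | github.com/RohanDevereux/Bridging | src/bridging/ppb/trajectory_mode.py | _complex_index
-- ===== SOURCE A (Python) =====
-- def _source_rank(entry: dict) -> int:
--     src = str(entry.get("pdbcode", "")).split("_", 1)[0].upper().strip()
--     if src.startswith("F") and src[1:].isdigit():
--         return int(src[1:])
--     return 10**9
--
-- def _complex_index(entries: list[dict]) -> dict[str, list[int]]:
--     grouped: dict[str, list[tuple[int, int]]] = {}
--     for i, e in enumerate(entries):
--         key = str(e["PP_ID"]).upper()
--         grouped.setdefault(key, []).append((_source_rank(e), i))
--     out: dict[str, list[int]] = {}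
--     for key, pairs in grouped.items():
--         pairs = sorted(pairs, key=lambda t: (t[0], t[1]))
--         out[key] = [idx for _, idx in pairs]
--     return out
-- ===== SOURCE B (Python) =====
-- def _source_rank(entry: dict) -> int:
--     src = str(entry.get("pdbcode", "")).split("_", 1)[0].upper().strip()
--     if src.startswith("F") and src[1:].isdigit():
--         return int(src[1:])
--     return 10**9
--
-- def _complex_index(entries: list[dict]) -> dict[str, list[int]]:
--     # One global stable sort of the indices by source rank, then a single
--     # grouping pass; keys are seeded first so insertion order is encounter order.
--     keys = [str(e["PP_ID"]).upper() for e in entries]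
--     ranks = [_source_rank(e) for e in entries]
--     out = {k: [] for k in keys}
--     for i in sorted(range(len(entries)), key=ranks.__getitem__):
--         out[keys[i]].append(i)
--     return out
-- ===== Notes on version B (the rewrite author's own statement) =====
-- stated objective: alternative
-- what changed: Replaces A's per-key sorts of (rank, index) pairs inside each group by one global stable sort of all indices keyed on source rank followed by a single grouping pass over keys seeded in encounter order.
import Mathlib
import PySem

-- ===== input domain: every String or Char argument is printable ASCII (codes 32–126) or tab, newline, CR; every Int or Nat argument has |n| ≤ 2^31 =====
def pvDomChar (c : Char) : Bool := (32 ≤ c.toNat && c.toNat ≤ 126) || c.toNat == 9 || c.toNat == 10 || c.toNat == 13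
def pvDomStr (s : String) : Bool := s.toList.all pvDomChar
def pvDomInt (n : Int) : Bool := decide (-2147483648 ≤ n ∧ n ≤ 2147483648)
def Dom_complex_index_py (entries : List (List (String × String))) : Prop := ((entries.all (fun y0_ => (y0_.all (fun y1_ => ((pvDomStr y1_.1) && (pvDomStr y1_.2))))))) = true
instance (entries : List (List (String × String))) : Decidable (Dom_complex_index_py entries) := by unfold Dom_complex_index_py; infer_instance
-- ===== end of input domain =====

-- B groups via ONE global stable sort of the indices by source rank plus a single
-- grouping pass, instead of A's per-key sorts (objective: alternative decomposition).

-- ===== PORT A =====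

-- _source_rank (shared helper of both Pythons).  str(...) on the looked-up value is
-- the identity (values are strings); dict lookup is first-match on the assoc list.
def pvRank (e : List (String × String)) : Int :=
  let src := PySem.Str.strip (PySem.Str.upper
    (((PySem.Str.splitMax? ((List.lookup "pdbcode" e).getD "") "_" 1).getD []).headD ""))
  if PySem.Str.startswith src "F" && PySem.Str.strIsdigit (PySem.Str.slice src (some 1) none) then
    -- int(src[1:]): isdigit (nonempty, ASCII digits on Dom) guarantees int() succeeds
    (PySem.Int.ofStr? (PySem.Str.slice src (some 1) none)).getD 0
  else 10 ^ 9

-- str(e["PP_ID"]).upper(); e["PP_ID"] raises KeyError when absent — excluded by Pre_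
def pvKey (e : List (String × String)) : String :=
  PySem.Str.upper ((List.lookup "PP_ID" e).getD "")

-- grouped.setdefault(key, []).append(p): update first matching key in place, else append
def pvUpsert (g : List (String × List (Int × Int))) (k : String) (p : Int × Int) :
    List (String × List (Int × Int)) :=
  match g with
  | [] => [(k, [p])]
  | (k', v) :: rest => if k' = k then (k', v ++ [p]) :: rest else (k', v) :: pvUpsert rest k p

-- out[key] = v: overwrite the first matching key keeping its position, else append
def pvSetval (d : List (String × List Int)) (k : String) (v : List Int) :
    List (String × List Int) :=
  match d with
  | [] => [(k, v)]
  | (k', v') :: rest => if k' = k then (k', v) :: rest else (k', v') :: pvSetval rest k v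

def complex_index_py (entries : List (List (String × String))) : List (String × List Int) :=
  let grouped := (PySem.List.enumerate entries).foldl
    (fun g ie => pvUpsert g (pvKey ie.2) (pvRank ie.2, ie.1)) []
  grouped.foldl
    (fun out kp => pvSetval out kp.1 ((PySem.List.sorted2 kp.2 Prod.fst Prod.snd).map Prod.snd)) []

-- ===== PORT B =====

-- out[k].append(i): append to the entry of the (always present) key k; on a missing
-- key Python would raise KeyError, unreachable here since every key was seeded
def pvAppendAt (d : List (String × List Int)) (k : String) (i : Int) :
    List (String × List Int) :=
  match d with
  | [] => []
  | (k', v) :: rest => if k' = k then (k', v ++ [i]) :: rest else (k', v) :: pvAppendAt rest k i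

def complex_index_py_alt (entries : List (List (String × String))) : List (String × List Int) :=
  let keys := entries.map pvKey
  let ranks := entries.map pvRank
  let out0 := keys.foldl (fun acc k => pvSetval acc k []) []
  let order := PySem.List.sorted (PySem.List.pyRange 0 entries.length 1)
    (fun i => (PySem.List.pyGet? ranks i).getD 0)
  order.foldl (fun acc i => pvAppendAt acc ((PySem.List.pyGet? keys i).getD "") i) out0

-- ===== PRECONDITION & SPEC =====
-- Pre_ excludes exactly the inputs where some entry lacks the key "PP_ID": there the
-- Python A raises KeyError (B raises the same KeyError).
def Pre_complex_index_py (entries : List (List (String × String))) : Prop :=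
  ∀ e ∈ entries, (List.lookup "PP_ID" e).isSome = true
instance (entries : List (List (String × String))) : Decidable (Pre_complex_index_py entries) := by unfold Pre_complex_index_py; infer_instance

def pvWitness_complex_index_py : (List (List (String × String))) :=
  [[("PP_ID", "ab"), ("pdbcode", "F2_x")], [("PP_ID", "AB"), ("pdbcode", "F10")], [("PP_ID", "c")]]

def Spec_complex_index_py (entries : List (List (String × String))) (out : List (String × List Int)) : Prop := out = complex_index_py_alt entries
instance (entries : List (List (String × String))) (out : List (String × List Int)) : Decidable (Spec_complex_index_py entries out) := by unfold Spec_complex_index_py; infer_instance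

-- ===== CLAIM (what is proved, stated in full; the proofs are below) =====
def Claim_equal_complex_index_py : Prop := ∀ (entries : List (List (String × String))), Dom_complex_index_py entries → Pre_complex_index_py entries → Spec_complex_index_py entries (complex_index_py entries)

-- ===== LEMMAS AND PROOFS =====

-- ---- generic insertion-sort lemmas ----

theorem pvInsertBy_congr {α : Type} (b1 b2 : α → α → Bool) (x : α) (acc : List α)
    (h : ∀ y ∈ acc, b1 x y = b2 x y) :
    PySem.List.insertBy b1 x acc = PySem.List.insertBy b2 x acc := by
  induction acc with
  | nil => rfl
  | cons y ys ih =>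
    simp only [PySem.List.insertBy]
    rw [h y (by simp), ih (fun z hz => h z (by simp [hz]))]

theorem pvFoldl_insertBy_congr {α : Type} (b1 b2 : α → α → Bool) :
    ∀ (xs acc : List α), (∀ x ∈ xs, ∀ y ∈ acc, b1 x y = b2 x y) →
    xs.Pairwise (fun y x => b1 x y = b2 x y) →
    xs.foldl (fun a x => PySem.List.insertBy b1 x a) acc
      = xs.foldl (fun a x => PySem.List.insertBy b2 x a) acc := by
  intro xs
  induction xs with
  | nil => intro acc _ _; rfl
  | cons x xs ih =>
    intro acc hacc hpw
    simp only [List.foldl_cons]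
    rw [pvInsertBy_congr b1 b2 x acc (hacc x (by simp))]
    refine ih _ ?_ (List.Pairwise.of_cons hpw)
    intro x' hx' y hy
    rcases (PySem.List.mem_insertBy b2 x y acc).1 hy with rfl | hy
    · exact (List.pairwise_cons.1 hpw).1 x' hx'
    · exact hacc x' (by simp [hx']) y hy

theorem pvPairwise_insertBy {α : Type} (b : α → α → Bool)
    (htr : ∀ p q r, b p q = true → b q r = true → b p r = true)
    (hasym : ∀ p q, b p q = true → b q p = false)
    (x : α) (acc : List α) (h : acc.Pairwise (fun p q => b q p = false)) :
    (PySem.List.insertBy b x acc).Pairwise (fun p q => b q p = false) := by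
  induction acc with
  | nil => simp [PySem.List.insertBy]
  | cons y ys ih =>
    rcases List.pairwise_cons.1 h with ⟨hy, hys⟩
    simp only [PySem.List.insertBy]
    by_cases hxy : b x y = true
    · simp only [hxy, if_true]
      refine List.pairwise_cons.2 ⟨?_, h⟩
      intro z hz
      rcases List.mem_cons.1 hz with rfl | hz
      · exact hasym _ _ hxy
      · by_contra hzx
        have hzx' : b z x = true := by
          cases hb : b z x
          · exact absurd hb hzx
          · rfl
        exact (by simp [hy z hz] : ¬ b z y = true) (htr _ _ _ hzx' hxy)
    · simp only [hxy, Bool.false_eq_true, if_false]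
      refine List.pairwise_cons.2 ⟨?_, ih hys⟩
      intro z hz
      rcases (PySem.List.mem_insertBy b x z ys).1 hz with rfl | hz
      · cases hb : b z y
        · rfl
        · exact absurd hb (by simp [hxy])
      · exact hy z hz

theorem pvPairwise_foldl_insertBy {α : Type} (b : α → α → Bool)
    (htr : ∀ p q r, b p q = true → b q r = true → b p r = true)
    (hasym : ∀ p q, b p q = true → b q p = false)
    (xs : List α) : ∀ (acc : List α), acc.Pairwise (fun p q => b q p = false) →
    (xs.foldl (fun a x => PySem.List.insertBy b x a) acc).Pairwise (fun p q => b q p = false) := by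
  induction xs with
  | nil => intro acc h; exact h
  | cons x xs ih =>
    intro acc h
    exact ih _ (pvPairwise_insertBy b htr hasym x acc h)

theorem pvSorted_unique {α : Type} (b : α → α → Bool) :
    ∀ (zs ys : List α), zs.Perm ys → zs.Pairwise (fun p q => b p q = true) →
    ys.Pairwise (fun p q => b q p = false) → zs = ys := by
  intro zs
  induction zs with
  | nil => intro ys hp _ _; exact (List.Perm.nil_eq hp).symm ▸ rfl
  | cons a zs ih =>
    intro ys hp h1 h2
    cases ys with
    | nil => exact absurd hp.symm (by simp)
    | cons c ys =>
      have hac : a = c := by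
        by_contra hne
        have ha : a ∈ c :: ys := hp.mem_iff.1 (by simp)
        have ha' : a ∈ ys := by rcases List.mem_cons.1 ha with h | h; exact absurd h hne; exact h
        have hc : c ∈ a :: zs := hp.mem_iff.2 (by simp)
        have hc' : c ∈ zs := by
          rcases List.mem_cons.1 hc with h | h; exact absurd h.symm hne; exact h
        have h1' : b a c = true := (List.pairwise_cons.1 h1).1 c hc'
        have h2' : b a c = false := (List.pairwise_cons.1 h2).1 a ha'
        simp [h1'] at h2'
      subst hac
      have := ih ys (hp.cons_inv) (List.Pairwise.of_cons h1) (List.Pairwise.of_cons h2)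
      rw [this]
-- ---- association-list lemmas ----

theorem pvUpsert_eq (g : List (String × List (Int × Int))) (k : String) (p : Int × Int)
    (hnd : (g.map Prod.fst).Nodup) :
    pvUpsert g k p = if k ∈ g.map Prod.fst then
        g.map (fun kp => if kp.1 = k then (kp.1, kp.2 ++ [p]) else kp)
      else g ++ [(k, [p])] := by
  induction g with
  | nil => simp [pvUpsert]
  | cons kv g ih =>
    obtain ⟨k', v⟩ := kv
    simp only [List.map_cons, List.nodup_cons] at hnd
    by_cases hk : k' = k
    · subst hk
      have htail : g.map (fun kp => if kp.1 = k' then (kp.1, kp.2 ++ [p]) else kp) = g := by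
        refine (List.map_congr_left ?_).trans (List.map_id _)
        intro kp hkp
        have : kp.1 ≠ k' := fun h => hnd.1 (h ▸ List.mem_map_of_mem hkp)
        simp [this]
      simp [pvUpsert, htail]
    · simp only [pvUpsert, if_neg hk, ih hnd.2, List.map_cons, List.mem_cons]
      by_cases hm : k ∈ g.map Prod.fst
      · simp [hm, Ne.symm hk, hk]
      · simp [hm, Ne.symm hk, hk]

theorem pvSetval_map_upsert (g : List (String × List (Int × Int))) (k : String) (p : Int × Int) :
    pvSetval (g.map (fun kp => (kp.1, ([] : List Int)))) k []
      = (pvUpsert g k p).map (fun kp => (kp.1, ([] : List Int))) := by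
  induction g with
  | nil => simp [pvSetval, pvUpsert]
  | cons kv g ih =>
    obtain ⟨k', v⟩ := kv
    by_cases hk : k' = k
    · subst hk; simp [pvSetval, pvUpsert]
    · simp [pvSetval, pvUpsert, hk, ih]

theorem pvFoldl_setval_map :
    ∀ (ps : List (String × (Int × Int))) (g : List (String × List (Int × Int))),
    (ps.map Prod.fst).foldl (fun a k => pvSetval a k []) (g.map (fun kp => (kp.1, ([] : List Int))))
      = (ps.foldl (fun a q => pvUpsert a q.1 q.2) g).map (fun kp => (kp.1, ([] : List Int))) := by
  intro ps
  induction ps with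
  | nil => intro g; rfl
  | cons q ps ih =>
    intro g
    simp only [List.map_cons, List.foldl_cons, pvSetval_map_upsert g q.1 q.2]
    exact ih _

theorem pvSetval_append (d : List (String × List Int)) (k : String) (v : List Int)
    (h : k ∉ d.map Prod.fst) : pvSetval d k v = d ++ [(k, v)] := by
  induction d with
  | nil => rfl
  | cons kv d ih =>
    obtain ⟨k', v'⟩ := kv
    simp only [List.map_cons, List.mem_cons] at h
    push_neg at h
    simp [pvSetval, Ne.symm h.1, ih h.2]

theorem pvFoldl_setval_nodup (f : String × List (Int × Int) → List Int) :
    ∀ (l : List (String × List (Int × Int))) (acc : List (String × List Int)),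
    (l.map Prod.fst).Nodup → (∀ k ∈ l.map Prod.fst, k ∉ acc.map Prod.fst) →
    l.foldl (fun out kp => pvSetval out kp.1 (f kp)) acc
      = acc ++ l.map (fun kp => (kp.1, f kp)) := by
  intro l
  induction l with
  | nil => intro acc _ _; simp
  | cons kp l ih =>
    intro acc hnd hdisj
    simp only [List.map_cons, List.nodup_cons] at hnd
    simp only [List.foldl_cons]
    rw [pvSetval_append acc kp.1 (f kp) (hdisj kp.1 (by simp))]
    rw [ih _ hnd.2 ?_]
    · simp
    · intro k hk
      simp only [List.map_append, List.mem_append, List.map_cons]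
      push_neg
      constructor
      · exact hdisj k (by simp [hk])
      · simp only [List.map_nil, List.mem_singleton]
        intro h; exact hnd.1 (h ▸ hk)

theorem pvAppendAt_map (g : List (String × List (Int × Int)))
    (v : String × List (Int × Int) → List Int) (k : String) (i : Int)
    (hnd : (g.map Prod.fst).Nodup) :
    pvAppendAt (g.map (fun kp => (kp.1, v kp))) k i
      = g.map (fun kp => (kp.1, if kp.1 = k then v kp ++ [i] else v kp)) := by
  induction g with
  | nil => rfl
  | cons kv g ih =>
    simp only [List.map_cons, List.nodup_cons] at hnd
    by_cases hk : kv.1 = k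
    · simp only [List.map_cons, pvAppendAt, if_pos hk, if_pos hk]
      congr 1
      refine (List.map_congr_left ?_).symm
      intro kp hkp
      have : kp.1 ≠ k := by
        intro h
        exact hnd.1 (by rw [hk, ← h]; exact List.mem_map_of_mem hkp)
      simp [this]
    · simp [pvAppendAt, hk, ih hnd.2]

theorem pvFoldl_appendAt (keyAtF : Int → String) (g : List (String × List (Int × Int)))
    (hnd : (g.map Prod.fst).Nodup) :
    ∀ (os : List Int) (v : String × List (Int × Int) → List Int),
    os.foldl (fun a i => pvAppendAt a (keyAtF i) i) (g.map (fun kp => (kp.1, v kp)))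
      = g.map (fun kp => (kp.1, v kp ++ os.filter (fun i => keyAtF i = kp.1))) := by
  intro os
  induction os with
  | nil => intro v; simp
  | cons i os ih =>
    intro v
    simp only [List.foldl_cons]
    rw [pvAppendAt_map g v (keyAtF i) i hnd, ih]
    refine List.map_congr_left ?_
    intro kp _
    by_cases hk : kp.1 = keyAtF i
    · simp [hk, List.filter_cons, List.append_assoc]
    · have : ¬ (keyAtF i = kp.1) := fun h => hk h.symm
      simp [hk, List.filter_cons, this]

theorem pvGrouped_inv (ps : List (String × (Int × Int))) :
    (((ps.foldl (fun a q => pvUpsert a q.1 q.2) []).map Prod.fst).Nodup)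
    ∧ (∀ k, k ∈ (ps.foldl (fun a q => pvUpsert a q.1 q.2) []).map Prod.fst ↔ k ∈ ps.map Prod.fst)
    ∧ (∀ kp ∈ ps.foldl (fun a q => pvUpsert a q.1 q.2) [],
        kp.2 = (ps.filter (fun q => q.1 = kp.1)).map Prod.snd) := by
  induction ps using List.reverseRecOn with
  | nil => simp
  | append_singleton ps q ih =>
    obtain ⟨hnd, hiff, hval⟩ := ih
    have hstep : (ps ++ [q]).foldl (fun a q => pvUpsert a q.1 q.2) []
        = pvUpsert (ps.foldl (fun a q => pvUpsert a q.1 q.2) []) q.1 q.2 := by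
      simp [List.foldl_append]
    set g := ps.foldl (fun a q => pvUpsert a q.1 q.2) [] with hg
    rw [hstep, pvUpsert_eq g q.1 q.2 hnd]
    by_cases hm : q.1 ∈ g.map Prod.fst
    · rw [if_pos hm]
      have hkeys : (g.map (fun kp => if kp.1 = q.1 then (kp.1, kp.2 ++ [q.2]) else kp)).map Prod.fst
          = g.map Prod.fst := by
        rw [List.map_map]
        refine List.map_congr_left ?_
        intro kp _
        by_cases h : kp.1 = q.1 <;> simp [h]
      refine ⟨by rw [hkeys]; exact hnd, ?_, ?_⟩
      · intro k
        rw [hkeys, hiff k]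
        simp only [List.map_append, List.mem_append, List.map_cons, List.map_nil,
          List.mem_singleton]
        constructor
        · exact Or.inl
        · rintro (h | rfl)
          · exact h
          · exact (hiff q.1).1 hm
      · intro kp' hkp'
        rcases List.mem_map.1 hkp' with ⟨kp, hkp, rfl⟩
        by_cases h : kp.1 = q.1
        · simp only [if_pos h]
          rw [List.filter_append, List.map_append, ← hval kp hkp]
          simp [List.filter_cons, ← h]
        · simp only [if_neg h]
          rw [List.filter_append, List.map_append, ← hval kp hkp]
          have hq : ¬ (q.1 = kp.1) := fun hh => h hh.symm
          simp [List.filter_cons, hq]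
    · rw [if_neg hm]
      have hq1 : q.1 ∉ ps.map Prod.fst := fun h => hm ((hiff q.1).2 h)
      refine ⟨?_, ?_, ?_⟩
      · simp only [List.map_append, List.map_cons, List.map_nil]
        exact List.Nodup.append hnd (List.nodup_singleton _)
          (by intro a ha hb; simp at hb; exact hm (hb ▸ ha))
      · intro k
        simp only [List.map_append, List.mem_append, List.map_cons, List.map_nil,
          List.mem_singleton, hiff k]
      · intro kp hkp
        rcases List.mem_append.1 hkp with hkp | hkp
        · rw [hval kp hkp, List.filter_append]
          have : ¬ (q.1 = kp.1) := by
            intro h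
            exact hm ((h ▸ List.mem_map_of_mem hkp : q.1 ∈ g.map Prod.fst))
          simp [List.filter_cons, this]
        · simp only [List.mem_singleton] at hkp
          subst hkp
          rw [List.filter_append]
          have hnil : List.filter (fun q' => decide (q'.1 = q.1)) ps = [] := by
            rw [List.filter_eq_nil_iff]
            intro a ha
            simp only [decide_eq_true_eq]
            intro h
            exact hq1 (h ▸ List.mem_map_of_mem ha)
          simp [hnil, List.filter_cons]

theorem pvEnum_map_snd {α : Type} :
    ∀ (l : List α) (s : Int), (PySem.List.enumerate l s).map Prod.snd = l := by
  intro l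
  induction l with
  | nil => intro s; rfl
  | cons x l ih => intro s; simp [PySem.List.enumerate, ih]

theorem pvEnum_zip {α : Type} :
    ∀ (l : List α) (s : Int),
    PySem.List.enumerate l s = (PySem.List.pyRange s (s + l.length) 1).zip l := by
  intro l
  induction l with
  | nil =>
    intro s
    simp [PySem.List.enumerate]
  | cons x l ih =>
    intro s
    have hlt : s < s + ((x :: l).length : Int) := by simp only [List.length_cons, Nat.cast_add, Nat.cast_one]; omega
    rw [PySem.List.pyRange_one_cons hlt]
    have harith : s + ((x :: l).length : Int) = (s + 1) + (l.length : Int) := by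
      simp [List.length_cons]; push_cast; ring
    rw [harith]
    simp [PySem.List.enumerate, List.zip_cons_cons, ih]
-- ---- proof-side abbreviations ----

def pvPs (entries : List (List (String × String))) : List (String × (Int × Int)) :=
  (PySem.List.enumerate entries).map (fun ie => (pvKey ie.2, (pvRank ie.2, ie.1)))

def pvG (entries : List (List (String × String))) : List (String × List (Int × Int)) :=
  (pvPs entries).foldl (fun a q => pvUpsert a q.1 q.2) []

def pvKeyAt (entries : List (List (String × String))) (i : Int) : String :=
  (PySem.List.pyGet? (entries.map pvKey) i).getD ""

def pvRankAt (entries : List (List (String × String))) (i : Int) : Int :=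
  (PySem.List.pyGet? (entries.map pvRank) i).getD 0

def pvOrder (entries : List (List (String × String))) : List Int :=
  PySem.List.sorted (PySem.List.pyRange 0 entries.length 1) (pvRankAt entries)

def pvBLex (entries : List (List (String × String))) (i j : Int) : Bool :=
  decide (pvRankAt entries i < pvRankAt entries j ∨ (pvRankAt entries i = pvRankAt entries j ∧ i < j))

def pvB2 (a b : Int × Int) : Bool :=
  decide (a.1 < b.1) || (!decide (b.1 < a.1) && decide (a.2 < b.2))

-- ---- the two sides in canonical form ----

theorem pvA_eq (entries : List (List (String × String))) :
    complex_index_py entries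
      = (pvG entries).map (fun kp => (kp.1, (PySem.List.sorted2 kp.2 Prod.fst Prod.snd).map Prod.snd)) := by
  obtain ⟨hnd, -, -⟩ := pvGrouped_inv (pvPs entries)
  have hnd' : ((pvG entries).map Prod.fst).Nodup := hnd
  have h1 : (PySem.List.enumerate entries).foldl
      (fun g ie => pvUpsert g (pvKey ie.2) (pvRank ie.2, ie.1)) [] = pvG entries := by
    unfold pvG pvPs
    rw [List.foldl_map]
  unfold complex_index_py
  show ((PySem.List.enumerate entries).foldl
      (fun g ie => pvUpsert g (pvKey ie.2) (pvRank ie.2, ie.1)) []).foldl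
      (fun out kp => pvSetval out kp.1 ((PySem.List.sorted2 kp.2 Prod.fst Prod.snd).map Prod.snd)) [] = _
  rw [h1, pvFoldl_setval_nodup _ (pvG entries) [] hnd' (by simp)]
  simp

theorem pvB_eq (entries : List (List (String × String))) :
    complex_index_py_alt entries
      = (pvG entries).map (fun kp => (kp.1, (pvOrder entries).filter (fun i => pvKeyAt entries i = kp.1))) := by
  obtain ⟨hnd, -, -⟩ := pvGrouped_inv (pvPs entries)
  have hnd' : ((pvG entries).map Prod.fst).Nodup := hnd
  have hkeys : entries.map pvKey = (pvPs entries).map Prod.fst := by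
    unfold pvPs
    rw [List.map_map]
    conv_lhs => rw [← pvEnum_map_snd entries 0, List.map_map]
    exact List.map_congr_left (fun ie _ => rfl)
  have hout0 : (entries.map pvKey).foldl (fun acc k => pvSetval acc k []) []
      = (pvG entries).map (fun kp => (kp.1, ([] : List Int))) := by
    rw [hkeys]
    have h := pvFoldl_setval_map (pvPs entries) []
    simpa using h
  unfold complex_index_py_alt
  show (pvOrder entries).foldl (fun acc i => pvAppendAt acc (pvKeyAt entries i) i)
      ((entries.map pvKey).foldl (fun acc k => pvSetval acc k []) []) = _
  rw [hout0]
  have h := pvFoldl_appendAt (pvKeyAt entries) (pvG entries) hnd' (pvOrder entries) (fun _ => [])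
  simpa using h

-- ---- the global sort, characterised ----

theorem pvOrder_perm (entries : List (List (String × String))) :
    (pvOrder entries).Perm (PySem.List.pyRange 0 entries.length 1) :=
  PySem.List.sorted_perm _ _ _

theorem pvOrder_eq (entries : List (List (String × String))) :
    pvOrder entries = (PySem.List.pyRange 0 entries.length 1).foldl
      (fun a i => PySem.List.insertBy (pvBLex entries) i a) [] := by
  unfold pvOrder
  rw [PySem.List.sorted_eq_foldl_insertBy]
  refine pvFoldl_insertBy_congr _ _ _ _ (by simp) ?_
  refine (PySem.List.pairwise_lt_pyRange_one 0 _).imp ?_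
  intro j i hji
  unfold pvBLex
  simp only [decide_eq_decide]
  omega

theorem pvOrder_pairwise (entries : List (List (String × String))) :
    (pvOrder entries).Pairwise (fun p q => pvBLex entries p q = true) := by
  have h1 : (pvOrder entries).Pairwise (fun p q => pvBLex entries q p = false) := by
    rw [pvOrder_eq]
    refine pvPairwise_foldl_insertBy _ ?_ ?_ _ [] (by simp)
    · intro p q r hpq hqr
      unfold pvBLex at hpq hqr ⊢
      simp only [decide_eq_true_eq] at hpq hqr ⊢
      omega
    · intro p q h
      unfold pvBLex at h ⊢
      simp only [decide_eq_true_eq] at h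
      simp only [decide_eq_false_iff_not]
      omega
  have hnodup : (pvOrder entries).Nodup :=
    ((pvOrder_perm entries).symm).nodup (PySem.List.nodup_pyRange_one _ _)
  refine (List.Pairwise.and h1 hnodup).imp ?_
  rintro a b ⟨hf, hne⟩
  unfold pvBLex at hf ⊢
  simp only [decide_eq_false_iff_not] at hf
  simp only [decide_eq_true_eq]
  omega

-- ---- the grouping pairs, re-indexed over the range ----

theorem pvPs_eq (entries : List (List (String × String))) :
    pvPs entries = (PySem.List.pyRange 0 entries.length 1).map
      (fun i => (pvKeyAt entries i, (pvRankAt entries i, i))) := by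
  unfold pvPs
  rw [pvEnum_zip entries 0, zero_add]
  apply List.ext_getElem
  · simp [PySem.List.length_pyRange_one]
  · intro j h1 h2
    have hj : j < entries.length := by
      simpa [PySem.List.length_pyRange_one] using h2
    simp only [List.getElem_map, List.getElem_zip, PySem.List.getElem_pyRange_one, zero_add]
    unfold pvKeyAt pvRankAt
    rw [PySem.List.pyGet?_natCast, PySem.List.pyGet?_natCast]
    simp [List.getElem?_map, List.getElem?_eq_getElem, hj]

-- ---- the per-key comparison ----

theorem pvCore (entries : List (List (String × String))) :
    ∀ kp ∈ pvG entries,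
    (PySem.List.sorted2 kp.2 Prod.fst Prod.snd).map Prod.snd
      = (pvOrder entries).filter (fun i => pvKeyAt entries i = kp.1) := by
  intro kp hkp
  obtain ⟨-, -, hval⟩ := pvGrouped_inv (pvPs entries)
  have hv : kp.2 = ((PySem.List.pyRange 0 entries.length 1).filter
      (fun i => decide (pvKeyAt entries i = kp.1))).map (fun i => (pvRankAt entries i, i)) := by
    have h := hval kp hkp
    rw [pvPs_eq] at h
    rw [h, List.filter_map, List.map_map]
    rfl
  have hperm : (((pvOrder entries).filter (fun i => decide (pvKeyAt entries i = kp.1))).map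
      (fun i => (pvRankAt entries i, i))).Perm kp.2 := by
    rw [hv]
    exact ((pvOrder_perm entries).filter _).map _
  have hpw : (((pvOrder entries).filter (fun i => decide (pvKeyAt entries i = kp.1))).map
      (fun i => (pvRankAt entries i, i))).Pairwise (fun p q => pvB2 p q = true) := by
    rw [List.pairwise_map]
    refine ((pvOrder_pairwise entries).filter _).imp ?_
    intro a b h
    unfold pvBLex at h
    unfold pvB2
    simp only [decide_eq_true_eq] at h
    simp only [Bool.or_eq_true, Bool.and_eq_true, Bool.not_eq_true', decide_eq_true_eq,
      decide_eq_false_iff_not]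
    omega
  have hs2 : PySem.List.sorted2 kp.2 Prod.fst Prod.snd
      = kp.2.foldl (fun acc x => PySem.List.insertBy pvB2 x acc) [] := by
    unfold pvB2
    simp [PySem.List.sorted2]
  have hpw2 : (PySem.List.sorted2 kp.2 Prod.fst Prod.snd).Pairwise (fun p q => pvB2 q p = false) := by
    rw [hs2]
    refine pvPairwise_foldl_insertBy _ ?_ ?_ _ [] (by simp)
    · intro p q r hpq hqr
      unfold pvB2 at hpq hqr ⊢
      simp only [Bool.or_eq_true, Bool.and_eq_true, Bool.not_eq_true', decide_eq_true_eq,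
        decide_eq_false_iff_not] at hpq hqr ⊢
      omega
    · intro p q h
      unfold pvB2 at h ⊢
      apply Bool.eq_false_iff.2
      intro hc
      simp only [Bool.or_eq_true, Bool.and_eq_true, Bool.not_eq_true', decide_eq_true_eq,
        decide_eq_false_iff_not] at h hc
      omega
  have hzeq : ((pvOrder entries).filter (fun i => decide (pvKeyAt entries i = kp.1))).map
      (fun i => (pvRankAt entries i, i)) = PySem.List.sorted2 kp.2 Prod.fst Prod.snd :=
    pvSorted_unique pvB2 _ _ (hperm.trans (PySem.List.sorted2_perm kp.2 _ _ false).symm) hpw hpw2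
  rw [← hzeq, List.map_map]
  have hid : (Prod.snd ∘ fun i : Int => (pvRankAt entries i, i)) = id := rfl
  rw [hid, List.map_id]

-- ---- assembly ----

theorem pvMain (entries : List (List (String × String))) :
    complex_index_py entries = complex_index_py_alt entries := by
  rw [pvA_eq, pvB_eq]
  exact List.map_congr_left (fun kp hkp => by rw [pvCore entries kp hkp])


-- ===== VERDICT (by name: the statement is the Claim_ definition above) =====
theorem complex_index_py_spec : Claim_equal_complex_index_py := by
  intro entries _ _
  exact pvMain entries
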